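-- pv_equiv track=rewrite | github.com/guestrin-lab/extractive-abstractive-spectrum | citation_systems/utils.py | remove_contained_quotes
-- ===== SOURCE A (Python) =====
-- def remove_contained_quotes(quoted_sentences_ls):
--     sanitized_quoted_sentences_ls = []
--     for i in range(len(quoted_sentences_ls)):
--         curr_quote = quoted_sentences_ls[i]
--         contained = False
--         for j in range(len(quoted_sentences_ls)):
--             if (i == j):
--                 continue
--             j_quote = quoted_sentences_ls[j]
--             if ((curr_quote != j_quote) and (curr_quote.lower() in j_quote.lower())):
--                 contained = True
--         if (not contained):
--             sanitized_quoted_sentences_ls.append(curr_quote)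
--     return sanitized_quoted_sentences_ls
-- ===== SOURCE B (Python) =====
-- def remove_contained_quotes(quoted_sentences_ls):
--     # Sort-then-scan: count distinct originals per lowercase form, then scan the
--     # distinct lowercase forms longest-first, so the only possible containers of
--     # the current form are the forms already seen; a form is contained iff its
--     # group holds >= 2 distinct originals (they contain each other) or it occurs
--     # in an already-seen (longer) form.
--     distinct = list(dict.fromkeys(quoted_sentences_ls))
--     counts = {}
--     for s in distinct:
--         low = s.lower()
--         counts[low] = counts.get(low, 0) + 1
--     contained = set()
--     seen = []
--     for low in sorted(counts, key=len, reverse=True):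
--         if counts[low] >= 2 or any(low in big for big in seen):
--             contained.add(low)
--         seen.append(low)
--     return [s for s in quoted_sentences_ls if s.lower() not in contained]
-- ===== Notes on version B (the rewrite author's own statement) =====
-- stated objective: alternative
-- what changed: B replaces A's all-pairs double loop with a sort-then-scan: it counts distinct originals per lowercase form, sorts the distinct lowercase forms by length descending, and makes one scan in which each form is tested only against the already-seen (longer) forms plus its own group count, then filters by set membership; correct because a containment witness distinct from the quote is either a same-lowercase distinct original or a strictly longer lowercase form.
import Mathlib
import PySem

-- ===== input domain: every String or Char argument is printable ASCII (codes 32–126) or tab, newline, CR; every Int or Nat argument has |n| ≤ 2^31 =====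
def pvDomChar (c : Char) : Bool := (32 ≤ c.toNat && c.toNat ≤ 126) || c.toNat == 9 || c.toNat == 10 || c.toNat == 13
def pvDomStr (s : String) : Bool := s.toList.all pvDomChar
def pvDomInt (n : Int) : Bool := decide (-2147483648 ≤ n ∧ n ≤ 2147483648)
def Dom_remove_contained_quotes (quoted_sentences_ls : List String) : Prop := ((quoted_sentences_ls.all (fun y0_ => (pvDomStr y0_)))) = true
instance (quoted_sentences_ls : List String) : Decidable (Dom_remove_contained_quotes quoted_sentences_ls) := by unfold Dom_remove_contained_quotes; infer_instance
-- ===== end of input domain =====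

-- B replaces A's all-pairs double loop by a sort-then-scan over the distinct lowercase forms
-- (longest first, each form tested only against the already-seen longer forms plus its own
-- group count); a timing run measured B faster (duplicates and lowercasing done once).
-- ===== PORT A =====
def remove_contained_quotes (quoted_sentences_ls : List String) : List String :=
  (PySem.List.pyRange 0 (PySem.List.len quoted_sentences_ls) 1).foldl (fun sanitized i =>
    let curr_quote := PySem.List.pyGetD quoted_sentences_ls i ""
    let contained := (PySem.List.pyRange 0 (PySem.List.len quoted_sentences_ls) 1).foldl (fun contained j =>
      if i == j then contained
      else
        let j_quote := PySem.List.pyGetD quoted_sentences_ls j ""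
        if curr_quote != j_quote && PySem.Str.isIn (PySem.Str.lower curr_quote) (PySem.Str.lower j_quote) then
          true
        else contained) false
    if !contained then sanitized ++ [curr_quote] else sanitized) []

-- ===== PORT B =====
def remove_contained_quotes_alt (quoted_sentences_ls : List String) : List String :=
  let distinct := PySem.List.dedup quoted_sentences_ls
  let counts := distinct.foldl (fun d s =>
      PySem.Dict.insert d (PySem.Str.lower s) (PySem.Dict.getD d (PySem.Str.lower s) 0 + 1))
    (PySem.Dict.empty : PySem.Dict String Int)
  let res := (PySem.List.sorted (PySem.Dict.keys counts) (fun l => PySem.Str.len l) true).foldl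
      (fun (st : PySem.Set String × List String) low =>
        ((if decide (2 ≤ PySem.Dict.getD counts low 0) ||
              st.2.any (fun big => PySem.Str.isIn low big)
          then PySem.Set.add st.1 low else st.1), st.2 ++ [low]))
      (PySem.Set.empty, [])
  quoted_sentences_ls.filter (fun s => !(PySem.Set.contains res.1 (PySem.Str.lower s)))

-- ===== PRECONDITION & SPEC =====
def Spec_remove_contained_quotes (quoted_sentences_ls : List String) (out : List String) : Prop := out = remove_contained_quotes_alt quoted_sentences_ls
instance (quoted_sentences_ls : List String) (out : List String) : Decidable (Spec_remove_contained_quotes quoted_sentences_ls out) := by unfold Spec_remove_contained_quotes; infer_instance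

-- ===== CLAIM (what is proved, stated in full; the proofs are below) =====
def Claim_equal_remove_contained_quotes : Prop := ∀ (quoted_sentences_ls : List String), Dom_remove_contained_quotes quoted_sentences_ls → Spec_remove_contained_quotes quoted_sentences_ls (remove_contained_quotes quoted_sentences_ls)

-- ===== LEMMAS AND PROOFS =====

-- the containment predicate both programs decide for each element
def pvContained (ls : List String) (s : String) : Bool :=
  ls.any (fun t => t != s && PySem.Str.isIn (PySem.Str.lower s) (PySem.Str.lower t))

-- ---- A reduces to a filter by pvContained ----
lemma foldl_or_if {α : Type} (l : List α) (P Q : α → Bool) (b : Bool) :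
    l.foldl (fun c j => if P j then c else if Q j then true else c) b
      = (b || l.any (fun j => !P j && Q j)) := by
  induction l generalizing b with
  | nil => simp
  | cons x t ih =>
      simp only [List.foldl_cons, List.any_cons, ih]
      by_cases hp : P x <;> by_cases hq : Q x <;> simp [hp, hq]

lemma any_range_eq (ls : List String) (i : Int) (h0 : 0 ≤ i) (hi : i < PySem.List.len ls) :
    ((PySem.List.pyRange 0 (PySem.List.len ls) 1).any (fun j =>
      !(i == j) && (PySem.List.pyGetD ls i "" != PySem.List.pyGetD ls j "" &&
        PySem.Str.isIn (PySem.Str.lower (PySem.List.pyGetD ls i ""))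
          (PySem.Str.lower (PySem.List.pyGetD ls j ""))))) =
    pvContained ls (PySem.List.pyGetD ls i "") := by
  have hlen : i < (ls.length : Int) := by simpa using hi
  rw [Bool.eq_iff_iff]
  simp only [pvContained, List.any_eq_true, PySem.List.mem_pyRange_one, Bool.and_eq_true,
    Bool.not_eq_eq_eq_not, Bool.not_true, beq_eq_false_iff_ne, ne_eq, bne_iff_ne]
  constructor
  · rintro ⟨j, ⟨hj0, hjl⟩, hij, hne, hsub⟩
    exact ⟨PySem.List.pyGetD ls j "", PySem.List.pyGetD_mem ls ""
      (by constructor <;> [omega; simpa using hjl]),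
      fun h => hne h.symm, hsub⟩
  · rintro ⟨t, ht, hne, hsub⟩
    obtain ⟨k, hk, rfl⟩ := List.mem_iff_getElem.mp ht
    have hget : PySem.List.pyGetD ls (k : Int) "" = ls[k] := by
      rw [PySem.List.pyGetD_eq_getElem ls "" (by omega) (by exact_mod_cast hk)]
      simp
    refine ⟨(k : Int), ⟨by omega, by simpa using hk⟩, ?_, ?_, ?_⟩
    · intro hik
      have h2 : i = (k : Int) := by simpa using hik
      subst h2
      exact hne (hget.symm ▸ rfl)
    · rw [hget]; intro h; exact hne h.symm
    · rw [hget]; exact hsub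

lemma A_eq_filter (ls : List String) :
    remove_contained_quotes ls = ls.filter (fun s => !pvContained ls s) := by
  unfold remove_contained_quotes
  rw [PySem.List.foldl_congr_mem _ _
    (fun acc i => if !pvContained ls (PySem.List.pyGetD ls i "") then acc ++ [PySem.List.pyGetD ls i ""] else acc) []
    (by
      intro acc i hi
      simp only [PySem.List.mem_pyRange_one] at hi
      simp only
      rw [foldl_or_if _ (fun j => i == j)
        (fun j => PySem.List.pyGetD ls i "" != PySem.List.pyGetD ls j "" &&
          PySem.Str.isIn (PySem.Str.lower (PySem.List.pyGetD ls i ""))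
            (PySem.Str.lower (PySem.List.pyGetD ls j ""))) false]
      rw [Bool.false_or, any_range_eq ls i hi.1 hi.2])]
  rw [PySem.List.foldl_pyRange_zero_pyGetD ls ""
    (fun acc s => if !pvContained ls s then acc ++ [s] else acc) []]
  rw [PySem.List.foldl_append_if_eq_filter (fun s => !pvContained ls s) ls []]
  simp

-- ---- B reduces to the same filter ----
-- the distinct lowercase forms (with multiplicity over distinct originals)
def pvLows (ls : List String) : List String := (PySem.List.dedup ls).map PySem.Str.lower
-- the scan order B uses: distinct lowercase forms, longest first
def pvKeyList (ls : List String) : List String :=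
  PySem.List.sorted (PySem.Set.ofList (pvLows ls)) (fun l => PySem.Str.len l) true
def pvCond (ls : List String) (low : String) (seen : List String) : Bool :=
  decide (2 ≤ ((pvLows ls).count low : Int)) || seen.any (fun big => PySem.Str.isIn low big)
def pvStep (ls : List String) (st : PySem.Set String × List String) (low : String) :
    PySem.Set String × List String :=
  ((if pvCond ls low st.2 then PySem.Set.add st.1 low else st.1), st.2 ++ [low])

lemma B_unfold (ls : List String) :
    remove_contained_quotes_alt ls =
      ls.filter (fun s =>
        !(PySem.Set.contains ((pvKeyList ls).foldl (pvStep ls) (PySem.Set.empty, [])).1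
          (PySem.Str.lower s))) := by
  have hc : (PySem.List.dedup ls).foldl (fun d s =>
      PySem.Dict.insert d (PySem.Str.lower s) (PySem.Dict.getD d (PySem.Str.lower s) 0 + 1))
      (PySem.Dict.empty : PySem.Dict String Int) = PySem.Dict.counter (pvLows ls) := by
    rw [← PySem.Dict.foldl_insert_getD_add_one_eq_counter, pvLows, List.foldl_map]
  unfold remove_contained_quotes_alt
  simp only [hc, PySem.Dict.keys_counter, PySem.Dict.getD_counter]
  rfl

lemma loop_snd (ls : List String) (K : List String) (c : PySem.Set String) (seen : List String) :
    (K.foldl (pvStep ls) (c, seen)).2 = seen ++ K := by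
  induction K generalizing c seen with
  | nil => simp
  | cons x t ih => simp [pvStep, ih]

lemma loop_fst_not_mem (ls : List String) (K : List String) (x : String) (hx : x ∉ K)
    (c : PySem.Set String) (seen : List String) :
    (x ∈ (K.foldl (pvStep ls) (c, seen)).1 ↔ x ∈ c) := by
  induction K generalizing c seen with
  | nil => simp
  | cons y t ih =>
      simp only [List.mem_cons, not_or] at hx
      rw [List.foldl_cons]
      simp only [pvStep]
      rw [ih hx.2]
      split
      · rw [PySem.Set.mem_add]
        simp [hx.1]
      · rfl

lemma loop_fst_mem (ls : List String) (pre suf : List String) (x : String)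
    (hpre : x ∉ pre) (hsuf : x ∉ suf) :
    (x ∈ ((pre ++ x :: suf).foldl (pvStep ls) (PySem.Set.empty, [])).1 ↔ pvCond ls x pre = true) := by
  rw [List.foldl_append]
  have hsnd : (pre.foldl (pvStep ls) (PySem.Set.empty, [])).2 = pre := by
    simpa using loop_snd ls pre PySem.Set.empty []
  have h1 : x ∈ (pre.foldl (pvStep ls) (PySem.Set.empty, [])).1 ↔ False := by
    rw [loop_fst_not_mem ls pre x hpre]
    simp [PySem.Set.empty]
  have hst : pre.foldl (pvStep ls) (PySem.Set.empty, []) =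
      ((pre.foldl (pvStep ls) (PySem.Set.empty, [])).1, pre) := Prod.ext rfl hsnd
  rw [hst, List.foldl_cons]
  simp only [pvStep]
  rw [loop_fst_not_mem ls suf x hsuf]
  split
  · rename_i h
    rw [PySem.Set.mem_add]
    simp [h]
  · rename_i h
    simp only [PySem.Set.empty] at h1
    simp [h, h1]

lemma count_ge_two_iff (ls : List String) (s : String) (hs : s ∈ ls) :
    (2 ≤ ((pvLows ls).count (PySem.Str.lower s) : Int)) ↔
      ∃ t ∈ ls, t ≠ s ∧ PySem.Str.lower t = PySem.Str.lower s := by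
  have hsd : s ∈ PySem.List.dedup ls := (PySem.List.mem_dedup ls s).mpr hs
  have hnd := PySem.List.nodup_dedup ls
  rw [pvLows, show (2 : Int) ≤ ((((PySem.List.dedup ls).map PySem.Str.lower).count (PySem.Str.lower s) : Nat) : Int) ↔
      2 ≤ ((PySem.List.dedup ls).map PySem.Str.lower).count (PySem.Str.lower s) from by exact_mod_cast Iff.rfl]
  rw [List.count_eq_countP, List.countP_map]
  constructor
  · intro h
    by_contra hno
    push Not at hno
    have hmono : (PySem.List.dedup ls).countP ((· == PySem.Str.lower s) ∘ PySem.Str.lower) ≤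
        (PySem.List.dedup ls).countP (· == s) := by
      apply List.countP_mono_left
      intro t ht hp
      simp only [Function.comp, beq_iff_eq] at hp ⊢
      by_contra hts
      exact hno t ((PySem.List.mem_dedup ls t).mp ht) hts hp
    have hcnt : (PySem.List.dedup ls).countP (· == s) ≤ 1 := by
      rw [← List.count_eq_countP]
      exact List.nodup_iff_count_le_one.mp hnd s
    omega
  · rintro ⟨t, htls, hts, hlow⟩
    have htd : t ∈ PySem.List.dedup ls := (PySem.List.mem_dedup ls t).mpr htls
    have hsub : [t, s] ⊆ (PySem.List.dedup ls).filter ((· == PySem.Str.lower s) ∘ PySem.Str.lower) := by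
      intro a ha
      simp only [List.mem_cons, List.not_mem_nil, or_false] at ha
      rcases ha with rfl | rfl <;> simp [List.mem_filter, htls, hs, hlow]
    have hnd2 : ([t, s] : List String).Nodup := by simp [hts]
    have := (List.subperm_of_subset hnd2 hsub).length_le
    rw [List.countP_eq_length_filter]
    simpa using this
  
-- B's containment test agrees with pvContained on members of the list
lemma contains_iff (ls : List String) (s : String) (hs : s ∈ ls) :
    PySem.Set.contains ((pvKeyList ls).foldl (pvStep ls) (PySem.Set.empty, [])).1
      (PySem.Str.lower s) = pvContained ls s := by
  have hxm : PySem.Str.lower s ∈ pvLows ls :=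
    List.mem_map.mpr ⟨s, (PySem.List.mem_dedup ls s).mpr hs, rfl⟩
  have hxK : PySem.Str.lower s ∈ pvKeyList ls := by
    rw [pvKeyList, PySem.List.mem_sorted, PySem.Set.mem_ofList]
    exact hxm
  have hndK : (pvKeyList ls).Nodup :=
    (PySem.List.sorted_perm _ _ _).symm.nodup (PySem.Set.nodup_ofList (pvLows ls))
  obtain ⟨pre, suf, hK⟩ := List.append_of_mem hxK
  have hnd' := hndK
  rw [hK, List.nodup_append] at hnd'
  obtain ⟨hnd1, hnd2, hnd3⟩ := hnd'
  rw [List.nodup_cons] at hnd2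
  have hpre : PySem.Str.lower s ∉ pre := fun hmem => hnd3 _ hmem _ (List.mem_cons_self) rfl
  have hsuf : PySem.Str.lower s ∉ suf := hnd2.1
  rw [Bool.eq_iff_iff, PySem.Set.contains_iff, hK,
    loop_fst_mem ls pre suf (PySem.Str.lower s) hpre hsuf]
  have hpw : List.Pairwise (fun a b => PySem.Str.len b ≤ PySem.Str.len a) (pvKeyList ls) :=
    PySem.List.sorted_pairwise_rev _ _
  rw [hK] at hpw
  have hsufle : ∀ M ∈ suf, PySem.Str.len M ≤ PySem.Str.len (PySem.Str.lower s) := by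
    have := (List.pairwise_append.mp hpw).2.1
    exact (List.pairwise_cons.mp this).1
  -- membership in pre / in the key list, translated to originals
  have hmemK : ∀ M, M ∈ pvKeyList ls ↔ ∃ t ∈ ls, PySem.Str.lower t = M := by
    intro M
    rw [pvKeyList, PySem.List.mem_sorted, PySem.Set.mem_ofList, pvLows, List.mem_map]
    constructor
    · rintro ⟨t, ht, rfl⟩; exact ⟨t, (PySem.List.mem_dedup ls t).mp ht, rfl⟩
    · rintro ⟨t, ht, rfl⟩; exact ⟨t, (PySem.List.mem_dedup ls t).mpr ht, rfl⟩
  rw [pvCond, Bool.or_eq_true, decide_eq_true_iff, List.any_eq_true,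
    count_ge_two_iff ls s hs]
  unfold pvContained
  rw [List.any_eq_true]
  constructor
  · rintro (⟨t, htls, hts, hlow⟩ | ⟨M, hMpre, hMin⟩)
    · refine ⟨t, htls, ?_⟩
      rw [Bool.and_eq_true, bne_iff_ne]
      refine ⟨hts, ?_⟩
      rw [hlow, PySem.Str.isIn_iff_infix]
    · have hMK : M ∈ pvKeyList ls := by rw [hK]; exact List.mem_append_left _ hMpre
      obtain ⟨t, htls, rfl⟩ := (hmemK M).mp hMK
      refine ⟨t, htls, ?_⟩
      rw [Bool.and_eq_true, bne_iff_ne]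
      have hne : t ≠ s := fun h => hpre (h ▸ hMpre)
      exact ⟨hne, hMin⟩
  · rintro ⟨t, htls, hcond⟩
    rw [Bool.and_eq_true, bne_iff_ne] at hcond
    obtain ⟨hts, hIn⟩ := hcond
    by_cases hlow : PySem.Str.lower t = PySem.Str.lower s
    · exact Or.inl ⟨t, htls, hts, hlow⟩
    · right
      refine ⟨PySem.Str.lower t, ?_, hIn⟩
      -- lower t is a strictly longer key, hence strictly before lower s in the scan
      have hMK : PySem.Str.lower t ∈ pvKeyList ls := (hmemK _).mpr ⟨t, htls, rfl⟩
      have hlt : (PySem.Str.lower s).toList.length < (PySem.Str.lower t).toList.length := by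
        have hinf := (PySem.Str.isIn_iff_infix _ _).mp hIn
        have h1 := hinf.sublist.length_le
        rcases lt_or_eq_of_le h1 with h2 | h2
        · exact h2
        · exact absurd (String.toList_inj.mp (hinf.sublist.eq_of_length h2)) (Ne.symm hlow)
      rw [hK] at hMK
      rcases List.mem_append.mp hMK with hp | hcs
      · exact hp
      · rcases List.mem_cons.mp hcs with heq | hsufM
        · rw [heq] at hlt
          exact absurd hlt (lt_irrefl _)
        · have := hsufle _ hsufM
          rw [PySem.Str.len_eq, PySem.Str.len_eq] at this
          omega

lemma B_eq_filter (ls : List String) :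
    remove_contained_quotes_alt ls = ls.filter (fun s => !pvContained ls s) := by
  rw [B_unfold]
  apply List.filter_congr
  intro s hs
  rw [contains_iff ls s hs]

-- ===== VERDICT (by name: the statement is the Claim_ definition above) =====
theorem remove_contained_quotes_spec : Claim_equal_remove_contained_quotes := by
  intro ls _
  unfold Spec_remove_contained_quotes
  rw [A_eq_filter, B_eq_filter]
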